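-- pv_equiv track=rewrite | github.com/linksdl/meta-project-learning_programming_algorithms | huawei/字符串/HJ21 简单密码.py | encoderStr
-- ===== SOURCE A (Python) =====
-- def encoderStr(str):
--     """
--     描述
--     现在有一种密码变换算法。
--     九键手机键盘上的数字与字母的对应： 1--1， abc--2, def--3, ghi--4, jkl--5, mno--6, pqrs--7, tuv--8 wxyz--9, 0--0，把密码中出现的小写字母都变成九键键盘对应的数字，如：a 变成 2，x 变成 9.
--     而密码中出现的大写字母则变成小写之后往后移一位，如：X ，先变成小写，再往后移一位，变成了 y ，例外：Z 往后移是 a 。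
--     数字和其它的符号都不做变换。
--     数据范围： 输入的字符串长度满足 1 \le n \le 100 \1≤n≤100
--     输入描述：
--     输入一组密码，长度不超过100个字符。
--
--     输出描述：
--     输出密码变换后的字符串
--
--     输入：
--     YUANzhi1987
--     输出：
--     zvbo9441987
--     :param str:
--     :return:
--     """
--     new_str = []
--     for i in range(len(str)):
--         ch = str[i]
--         if ch.isupper():
--             if ch != 'Z':
--                 ch = chr(ord(ch.lower()) + 1)
--                 new_str.append(ch)
--             else:
--                 new_str.append('a')
--         elif ch in ['a', 'b', 'c']:
--             new_str.append('2')
--         elif ch in ['d', 'e', 'f']: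
--             new_str.append('3')
--         elif ch in ['g', 'h', 'i']:
--             new_str.append('4')
--         elif ch in ['j', 'k', 'l']:
--             new_str.append('5')
--         elif ch in ['m', 'n', 'o']:
--             new_str.append('6')
--         elif ch in ['p', 'q', 'r', 's']:
--             new_str.append('7')
--         elif ch in ['t', 'u', 'v']:
--             new_str.append('8')
--         elif ch in ['w', 'x', 'y', 'z']:
--             new_str.append('9')
--         else:
--             new_str.append(ch)
--
--     return new_str
-- ===== SOURCE B (Python) =====
-- def encoderStr(str):
--     # Pass 1: digitise lowercase letters arithmetically (no table, no branch chain):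
--     # k = letter index; the two 4-letter groups (pqrs, wxyz) are compressed by
--     # subtracting 1 past 's' and past 'z' before dividing by 3.
--     stage = []
--     for ch in str:
--         if 'a' <= ch <= 'z':
--             k = ord(ch) - 97
--             k -= (k > 17) + (k > 24)
--             stage.append(chr(k // 3 + 50))
--         else:
--             stage.append(ch)
--     # Pass 2: shift uppercase cyclically to the next lowercase letter (Z wraps to a)
--     # via modular arithmetic; digits produced in pass 1 are untouched.
--     return [chr((ord(c) - 64) % 26 + 97) if 'A' <= c <= 'Z' else c for c in stage]
-- ===== Notes on version B (the rewrite author's own statement) =====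
-- stated objective: alternative
-- what changed: Two staged passes instead of one branch chain: pass 1 digitises lowercase letters by pure arithmetic ((k adjusted for the two 4-letter groups)//3+50, no table or membership tests), pass 2 shifts uppercase letters with a cyclic (ord(c)-64)%26 formula so Z needs no special case.
import Mathlib
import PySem

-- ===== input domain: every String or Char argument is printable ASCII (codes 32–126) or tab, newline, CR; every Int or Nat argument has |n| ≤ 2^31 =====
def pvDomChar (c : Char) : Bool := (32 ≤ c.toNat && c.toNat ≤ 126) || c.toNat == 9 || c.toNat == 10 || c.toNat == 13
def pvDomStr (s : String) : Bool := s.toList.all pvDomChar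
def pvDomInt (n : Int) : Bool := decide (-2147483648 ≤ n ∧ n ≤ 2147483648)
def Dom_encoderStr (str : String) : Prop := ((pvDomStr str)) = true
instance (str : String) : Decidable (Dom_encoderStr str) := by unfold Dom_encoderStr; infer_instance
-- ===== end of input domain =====

-- B: two staged passes with arithmetic formulas instead of A's single pass of nine membership branches (alternative, same cost).

-- ===== PORT A =====
-- A's per-character branch chain, step for step
def pvStepA (ch : Char) : String :=
  if PySem.Chars.isupper ch then
    (if ch ≠ 'Z' then String.mk [Char.ofNat ((PySem.Chars.lowerChar ch).toNat + 1)] else "a")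
  else if ch = 'a' ∨ ch = 'b' ∨ ch = 'c' then "2"
  else if ch = 'd' ∨ ch = 'e' ∨ ch = 'f' then "3"
  else if ch = 'g' ∨ ch = 'h' ∨ ch = 'i' then "4"
  else if ch = 'j' ∨ ch = 'k' ∨ ch = 'l' then "5"
  else if ch = 'm' ∨ ch = 'n' ∨ ch = 'o' then "6"
  else if ch = 'p' ∨ ch = 'q' ∨ ch = 'r' ∨ ch = 's' then "7"
  else if ch = 't' ∨ ch = 'u' ∨ ch = 'v' then "8"
  else if ch = 'w' ∨ ch = 'x' ∨ ch = 'y' ∨ ch = 'z' then "9"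
  else String.mk [ch]

def encoderStr (str : String) : List String :=
  str.toList.foldl (fun acc ch => acc ++ [pvStepA ch]) []

-- ===== PORT B =====
-- pass 1: digitise lowercase letters by arithmetic
def pvPass1 (ch : Char) : Char :=
  if 'a' ≤ ch ∧ ch ≤ 'z' then
    let k := ch.toNat - 97
    let k := k - ((if k > 17 then 1 else 0) + (if k > 24 then 1 else 0))
    Char.ofNat (k / 3 + 50)
  else ch

-- pass 2: cyclic shift of uppercase letters to next lowercase letter
def pvPass2 (c : Char) : Char :=
  if 'A' ≤ c ∧ c ≤ 'Z' then Char.ofNat ((c.toNat - 64) % 26 + 97) else c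

def encoderStr_alt (str : String) : List String :=
  ((str.toList.map pvPass1).map pvPass2).map (fun c => String.mk [c])

-- ===== PRECONDITION & SPEC =====
def Spec_encoderStr (str : String) (out : List String) : Prop := out = encoderStr_alt str
instance (str : String) (out : List String) : Decidable (Spec_encoderStr str out) := by unfold Spec_encoderStr; infer_instance

-- ===== CLAIM (what is proved, stated in full; the proofs are below) =====
def Claim_equal_encoderStr : Prop := ∀ (str : String), Dom_encoderStr str → Spec_encoderStr str (encoderStr str)

-- ===== LEMMAS AND PROOFS =====
theorem pvFoldl_append_map (l : List Char) (acc : List String) :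
    l.foldl (fun acc ch => acc ++ [pvStepA ch]) acc = acc ++ l.map pvStepA := by
  induction l generalizing acc with
  | nil => simp
  | cons c t ih => simp [List.foldl, ih]

theorem pvStep_eq (c : Char) (hc : pvDomChar c = true) :
    pvStepA c = String.mk [pvPass2 (pvPass1 c)] := by
  have h : c.toNat < 128 := by
    unfold pvDomChar at hc
    simp only [Bool.or_eq_true, Bool.and_eq_true, decide_eq_true_eq, beq_iff_eq] at hc
    omega
  have key : ∀ n : Nat, n < 128 →
      pvStepA (Char.ofNat n) = String.mk [pvPass2 (pvPass1 (Char.ofNat n))] := by decide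
  have := key c.toNat h
  rwa [Char.ofNat_toNat] at this

-- ===== VERDICT (by name: the statement is the Claim_ definition above) =====
theorem encoderStr_spec : Claim_equal_encoderStr := by
  intro str hdom
  unfold Spec_encoderStr encoderStr encoderStr_alt
  rw [pvFoldl_append_map]
  simp only [List.nil_append, List.map_map]
  apply List.map_congr_left
  intro c hmem
  exact pvStep_eq c (by
    unfold Dom_encoderStr pvDomStr at hdom
    exact List.all_eq_true.mp hdom c hmem)
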